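-- pv_equiv track=rewrite | github.com/srijitsrajput-glitch/SeoTagView | utils.py | generate_seo_score
-- ===== SOURCE A (Python) =====
-- def generate_seo_score(analysis_results):
--     """Generate a numerical SEO score based on analysis results"""
--     total_checks = len(analysis_results)
--     if total_checks == 0:
--         return 0
--
--     scores = {
--         'good': 100,
--         'warning': 70,
--         'error': 0
--     }
--
--     total_score = 0
--     for analysis in analysis_results.values():
--         total_score += scores.get(analysis['status'], 0)
--
--     return round(total_score / total_checks)
-- ===== SOURCE B (Python) =====
-- def generate_seo_score(analysis_results):
--     """Generate a numerical SEO score based on analysis results"""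
--     checks = list(analysis_results.values())
--     if not checks:
--         return 0
--     # start from a perfect score and recursively subtract per-check penalties
--     deficit = _total_penalty(checks)
--     return round((100 * len(checks) - deficit) / len(checks))
--
-- def _total_penalty(checks):
--     if not checks:
--         return 0
--     s = checks[0]['status']
--     p = 0 if s == 'good' else 30 if s == 'warning' else 100
--     return p + _total_penalty(checks[1:])
-- ===== Notes on version B (the rewrite author's own statement) =====
-- stated objective: alternative
-- what changed: B computes the score from the complement: a recursive helper sums per-check penalties (good=0, warning=30, other=100) and the score is round((100*n - deficit)/n), instead of A's iterative accumulation of per-item scores through a lookup dict.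
import Mathlib
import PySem

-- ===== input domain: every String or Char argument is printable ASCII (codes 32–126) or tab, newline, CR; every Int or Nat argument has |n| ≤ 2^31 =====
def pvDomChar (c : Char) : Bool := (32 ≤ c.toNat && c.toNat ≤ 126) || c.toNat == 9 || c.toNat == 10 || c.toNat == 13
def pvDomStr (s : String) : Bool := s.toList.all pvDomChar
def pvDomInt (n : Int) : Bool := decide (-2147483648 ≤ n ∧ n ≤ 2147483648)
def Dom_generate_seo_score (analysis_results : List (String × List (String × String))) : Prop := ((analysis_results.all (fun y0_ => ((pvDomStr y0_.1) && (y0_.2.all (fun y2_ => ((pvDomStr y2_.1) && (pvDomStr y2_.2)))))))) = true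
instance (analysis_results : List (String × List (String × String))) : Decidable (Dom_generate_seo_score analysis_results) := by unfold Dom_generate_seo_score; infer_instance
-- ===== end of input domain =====

-- B computes the score from its complement: a recursive helper sums per-check penalties
-- (good=0, warning=30, other=100) and the score is round((100*n - deficit)/n); same O(n) cost,
-- a different (recursive, penalty-subtraction) decomposition of the task.

-- shared hand port of Python's round(t / n) for 0 ≤ t ≤ 100*n, 0 < n: exact rational
-- round-half-to-even; exact for these magnitudes (the float t/n never crosses a rounding boundary)
def pyRoundDiv (t n : Int) : Int :=
  let q := t / n
  let r := t % n
  if 2 * r < n then q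
  else if n < 2 * r then q + 1
  else if q % 2 = 0 then q else q + 1

-- ===== PORT A =====
def generate_seo_score (analysis_results : List (String × List (String × String))) : Int :=
  let d := PySem.Dict.ofList analysis_results
  let total_checks : Int := d.size
  if total_checks = 0 then 0
  else
    let scores : PySem.Dict String Int :=
      PySem.Dict.ofList [("good", 100), ("warning", 70), ("error", 0)]
    -- analysis['status']: Pre_ guarantees the key exists; the "" default is unreachable inside Pre_
    let total_score := d.values.foldl
      (fun acc analysis => acc + scores.getD ((PySem.Dict.ofList analysis).getD "status" "") 0) 0
    pyRoundDiv total_score total_checks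

-- ===== PORT B =====
-- _total_penalty: recursion on the list of checks, as in Source B
def total_penalty : List (List (String × String)) → Int
  | [] => 0
  | a :: rest =>
    let s := (PySem.Dict.ofList a).getD "status" ""   -- checks[0]['status'] (Pre_: key present)
    let p : Int := if s = "good" then 0 else if s = "warning" then 30 else 100
    p + total_penalty rest

def generate_seo_score_alt (analysis_results : List (String × List (String × String))) : Int :=
  let checks := (PySem.Dict.ofList analysis_results).values
  if checks = [] then 0
  else
    let deficit := total_penalty checks
    pyRoundDiv (100 * (checks.length : Int) - deficit) (checks.length : Int)

-- ===== PRECONDITION & SPEC =====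
-- Pre_ excludes inputs where some analysis dict lacks a 'status' key, on which A raises KeyError.
def Pre_generate_seo_score (analysis_results : List (String × List (String × String))) : Prop :=
  (analysis_results.all (fun p => p.2.any (fun q => q.1 == "status"))) = true
instance (analysis_results : List (String × List (String × String))) : Decidable (Pre_generate_seo_score analysis_results) := by unfold Pre_generate_seo_score; infer_instance
def pvWitness_generate_seo_score : (List (String × List (String × String))) :=
  [("title", [("status", "good")]), ("meta", [("status", "warning")])]

def Spec_generate_seo_score (analysis_results : List (String × List (String × String))) (out : Int) : Prop := out = generate_seo_score_alt analysis_results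
instance (analysis_results : List (String × List (String × String))) (out : Int) : Decidable (Spec_generate_seo_score analysis_results out) := by unfold Spec_generate_seo_score; infer_instance

-- ===== CLAIM (what is proved, stated in full; the proofs are below) =====
def Claim_equal_generate_seo_score : Prop := ∀ (analysis_results : List (String × List (String × String))), Dom_generate_seo_score analysis_results → Pre_generate_seo_score analysis_results → Spec_generate_seo_score analysis_results (generate_seo_score analysis_results)

-- ===== LEMMAS AND PROOFS =====

theorem score_lookup (s : String) :
    (PySem.Dict.ofList [("good", (100:Int)), ("warning", 70), ("error", 0)]).getD s 0
      = if s = "good" then 100 else if s = "warning" then 70 else 0 := by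
  rw [show PySem.Dict.ofList [("good", (100:Int)), ("warning", 70), ("error", 0)]
      = PySem.Dict.mk [("good", 100), ("warning", 70), ("error", 0)] from rfl]
  by_cases h1 : s = "good" <;> by_cases h2 : s = "warning" <;> by_cases h3 : s = "error" <;>
    simp [h1, h2, h3, PySem.Dict.getD_eq_get?_getD, Ne.symm, PySem.Dict.get?]

-- A's running sum equals the perfect score minus B's recursive penalty sum
theorem sum_fold (l : List (List (String × String))) (acc : Int) :
    l.foldl (fun a analysis => a +
        (PySem.Dict.ofList [("good", (100:Int)), ("warning", 70), ("error", 0)]).getD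
          ((PySem.Dict.ofList analysis).getD "status" "") 0) acc
      = acc + 100 * (l.length : Int) - total_penalty l := by
  induction l generalizing acc with
  | nil => simp [total_penalty]
  | cons x xs ih =>
    rw [List.foldl_cons, ih, score_lookup]
    simp only [total_penalty, List.length_cons]
    by_cases hg : (PySem.Dict.ofList x).getD "status" "" = "good" <;>
      by_cases hw : (PySem.Dict.ofList x).getD "status" "" = "warning" <;>
      simp_all <;> ring

-- ===== VERDICT (by name: the statement is the Claim_ definition above) =====
theorem generate_seo_score_spec : Claim_equal_generate_seo_score := by
  intro ar _ _
  unfold Spec_generate_seo_score generate_seo_score generate_seo_score_alt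
  by_cases h : (PySem.Dict.ofList ar).values = []
  · simp [PySem.Dict.size, PySem.Dict.values] at *
    simp [h]
  · have hlen : ((PySem.Dict.ofList ar).size : Int) = ((PySem.Dict.ofList ar).values.length : Int) := by
      simp [PySem.Dict.size, PySem.Dict.values]
    have hne : ((PySem.Dict.ofList ar).size : Int) ≠ 0 := by
      simp [PySem.Dict.size, PySem.Dict.values] at *
      omega
    simp only [h, hne, ite_false]
    rw [sum_fold, hlen]
    ring_nf
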